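-- pv_equiv track=rewrite | github.com/redaperol/AdventOfCode | 2025/day6/main.py | part1
-- ===== SOURCE A (Python) =====
-- def better_value_parser(list_str: list[str]) -> dict[list[int]]:
--     dic_value = {}
--     for line in list_str:
--         for nbr_idx, nbr in enumerate(line.split()):
--             if nbr_idx not in dic_value.keys():
--                 dic_value[nbr_idx] = []
--             dic_value[nbr_idx].append(int(nbr))
--     return dic_value
--
-- def multiply(list_int: list[int]) -> int:
--     results = 1
--     for val in list_int:
--         results *= val
--     return results
--
-- def part1(input: list[str]) -> int:
--     results = 0
--     dic_value = better_value_parser(input[:len(input) - 1])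
--     operations = input[-1].split()
--     for index, operations in enumerate(operations):
--         if operations == "+":
--             results += sum(dic_value[index])
--         else:
--             results += multiply(dic_value[index])
--     return results
-- ===== SOURCE B (Python) =====
-- def part1(input: list[str]) -> int:
--     # One fused pass: per-column running sum and product, no per-column lists.
--     run_sum = {}
--     run_prod = {}
--     for line in input[:-1]:
--         for idx, tok in enumerate(line.split()):
--             n = int(tok)
--             run_sum[idx] = run_sum.get(idx, 0) + n
--             run_prod[idx] = run_prod.get(idx, 1) * n
--     total = 0
--     for idx, op in enumerate(input[-1].split()):
--         total += run_sum[idx] if op == "+" else run_prod[idx]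
--     return total
-- ===== Notes on version B (the rewrite author's own statement) =====
-- stated objective: alternative
-- what changed: B fuses parsing and reduction: instead of grouping every number into per-column lists and then summing/multiplying each list per operation, it keeps one running sum and one running product per column in a single pass and only looks them up at the end.
import Mathlib
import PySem

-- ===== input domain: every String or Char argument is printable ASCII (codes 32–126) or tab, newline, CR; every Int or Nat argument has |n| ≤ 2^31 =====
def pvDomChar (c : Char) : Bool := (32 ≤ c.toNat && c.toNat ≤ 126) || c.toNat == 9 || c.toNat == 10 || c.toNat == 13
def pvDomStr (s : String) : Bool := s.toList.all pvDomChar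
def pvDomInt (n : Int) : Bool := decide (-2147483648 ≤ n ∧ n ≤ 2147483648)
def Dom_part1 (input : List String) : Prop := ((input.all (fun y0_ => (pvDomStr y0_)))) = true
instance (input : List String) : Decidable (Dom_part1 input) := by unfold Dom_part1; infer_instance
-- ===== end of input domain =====

-- B replaces A's per-column lists (grouped then summed/multiplied) by running sum/product
-- accumulators maintained in one fused pass; same asymptotic cost, less intermediate data.

-- ===== PORT A =====
-- multiply(list_int)
def pvMultiply (l : List Int) : Int := l.foldl (fun r v => r * v) 1

-- the body of A's inner loop over enumerate(line.split()); ofStr? none (ValueError) excluded by Pre_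
def pvStepA (d : PySem.Dict Int (List Int)) (p : Int × String) : PySem.Dict Int (List Int) :=
  let d1 := if d.contains p.1 then d else d.insert p.1 ([] : List Int)
  d1.modify p.1 [] (fun l => l ++ [(PySem.Int.ofStr? p.2).getD 0])

-- better_value_parser
def pvParser (list_str : List String) : PySem.Dict Int (List Int) :=
  list_str.foldl
    (fun d line => (PySem.List.enumerate (PySem.Str.split₀ line) 0).foldl pvStepA d)
    PySem.Dict.empty

def part1 (input : List String) : Int :=
  let dic := pvParser (PySem.List.slice input none (some ((input.length : Int) - 1)))
  -- input[-1]: none (IndexError on empty input) excluded by Pre_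
  let operations := PySem.Str.split₀ ((PySem.List.pyGet? input (-1)).getD "")
  -- dic[index]: KeyError (operations outnumbering columns) excluded by Pre_
  (PySem.List.enumerate operations 0).foldl
    (fun results p =>
      if p.2 == "+" then results + (dic.getD p.1 []).sum
      else results + pvMultiply (dic.getD p.1 []))
    0

-- ===== PORT B =====
-- the body of B's inner loop: update both running accumulators
def pvStepB (st : PySem.Dict Int Int × PySem.Dict Int Int) (p : Int × String) :
    PySem.Dict Int Int × PySem.Dict Int Int :=
  let n := (PySem.Int.ofStr? p.2).getD 0
  (st.1.insert p.1 (st.1.getD p.1 0 + n), st.2.insert p.1 (st.2.getD p.1 1 * n))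

def part1_alt (input : List String) : Int :=
  let st := (PySem.List.slice input none (some (-1))).foldl
    (fun st line => (PySem.List.enumerate (PySem.Str.split₀ line) 0).foldl pvStepB st)
    (PySem.Dict.empty, PySem.Dict.empty)
  (PySem.List.enumerate (PySem.Str.split₀ ((PySem.List.pyGet? input (-1)).getD "")) 0).foldl
    (fun total p => total + (if p.2 == "+" then st.1.getD p.1 0 else st.2.getD p.1 1))
    0

-- ===== PRECONDITION & SPEC =====
-- Pre_ excludes exactly the inputs where the Python A raises: empty input (IndexError on
-- input[-1]), a non-integer token in a value row (ValueError in int), and an operations row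
-- longer than every value row (KeyError on dic_value[index]).
def Pre_part1 (input : List String) : Prop :=
  input ≠ [] ∧
  (∀ line ∈ input.dropLast, ∀ tok ∈ PySem.Str.split₀ line, (PySem.Int.ofStr? tok).isSome = true) ∧
  (∀ i : Nat, i < (PySem.Str.split₀ (input.getLastD "")).length →
      ∃ line ∈ input.dropLast, i < (PySem.Str.split₀ line).length)
instance (input : List String) : Decidable (Pre_part1 input) := by unfold Pre_part1; infer_instance

def pvWitness_part1 : List String := ["1 2", "3 4", "+ *"]

def Spec_part1 (input : List String) (out : Int) : Prop := out = part1_alt input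
instance (input : List String) (out : Int) : Decidable (Spec_part1 input out) := by unfold Spec_part1; infer_instance

-- ===== CLAIM (what is proved, stated in full; the proofs are below) =====
def Claim_equal_part1 : Prop := ∀ (input : List String), Dom_part1 input → Pre_part1 input → Spec_part1 input (part1 input)

-- ===== LEMMAS AND PROOFS =====

-- the simulation invariant: column sums/products of A's dict equal B's accumulators
def pvRel (d : PySem.Dict Int (List Int)) (st : PySem.Dict Int Int × PySem.Dict Int Int) : Prop :=
  ∀ i : Int, (d.getD i []).sum = st.1.getD i 0 ∧ pvMultiply (d.getD i []) = st.2.getD i 1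

lemma pvGetD_ensure (d : PySem.Dict Int (List Int)) (k j : Int) :
    ((if d.contains k then d else d.insert k ([] : List Int))).getD j [] = d.getD j [] := by
  by_cases h : d.contains k
  · rw [if_pos h]
  · rw [if_neg h, PySem.Dict.getD_insert]
    split_ifs with hj
    · subst hj
      exact (PySem.Dict.getD_of_not_contains (h := by simpa using h) (d0 := [])).symm
    · rfl

lemma pvGetD_stepA (d : PySem.Dict Int (List Int)) (p : Int × String) (j : Int) :
    (pvStepA d p).getD j [] =
      if j = p.1 then d.getD p.1 [] ++ [(PySem.Int.ofStr? p.2).getD 0] else d.getD j [] := by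
  unfold pvStepA
  rw [PySem.Dict.getD_modify, pvGetD_ensure d p.1 p.1, pvGetD_ensure d p.1 j]

lemma pvMultiply_append (l : List Int) (n : Int) :
    pvMultiply (l ++ [n]) = pvMultiply l * n := by
  simp [pvMultiply, List.foldl_append]

lemma pvRel_step (d : PySem.Dict Int (List Int)) (st : PySem.Dict Int Int × PySem.Dict Int Int)
    (p : Int × String) (h : pvRel d st) : pvRel (pvStepA d p) (pvStepB st p) := by
  intro j
  rw [pvGetD_stepA]
  simp only [pvStepB, PySem.Dict.getD_insert]
  split_ifs with hj
  · subst hj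
    constructor
    · rw [List.sum_append, (h p.1).1]; simp
    · rw [pvMultiply_append, (h p.1).2]
  · exact h j

lemma pvRel_fold_inner (l : List (Int × String)) (d : PySem.Dict Int (List Int))
    (st : PySem.Dict Int Int × PySem.Dict Int Int) (h : pvRel d st) :
    pvRel (l.foldl pvStepA d) (l.foldl pvStepB st) := by
  induction l generalizing d st with
  | nil => exact h
  | cons x t ih => exact ih _ _ (pvRel_step d st x h)

lemma pvRel_fold_lines (lines : List String) (d : PySem.Dict Int (List Int))
    (st : PySem.Dict Int Int × PySem.Dict Int Int) (h : pvRel d st) :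
    pvRel
      (lines.foldl (fun d line => (PySem.List.enumerate (PySem.Str.split₀ line) 0).foldl pvStepA d) d)
      (lines.foldl (fun st line => (PySem.List.enumerate (PySem.Str.split₀ line) 0).foldl pvStepB st) st) := by
  induction lines generalizing d st with
  | nil => exact h
  | cons x t ih => exact ih _ _ (pvRel_fold_inner _ d st h)

lemma pvRel_empty : pvRel PySem.Dict.empty (PySem.Dict.empty, PySem.Dict.empty) := by
  intro i
  simp [PySem.Dict.getD_empty, pvMultiply]

lemma pvSlice_pred (xs : List String) :
    PySem.List.slice xs none (some ((xs.length : Int) - 1)) = xs.dropLast := by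
  cases xs with
  | nil => rfl
  | cons a t =>
      have h : ((a :: t).length : Int) - 1 = ((t.length : Nat) : Int) := by
        simp [List.length_cons]
      rw [h, PySem.List.slice_to_natCast]
      rw [List.dropLast_eq_take]
      simp

-- ===== VERDICT (by name: the statement is the Claim_ definition above) =====
theorem part1_spec : Claim_equal_part1 := by
  intro input _ _
  unfold Spec_part1 part1 part1_alt pvParser
  rw [pvSlice_pred, PySem.List.slice_to_neg_one]
  have hrel := pvRel_fold_lines input.dropLast PySem.Dict.empty
    (PySem.Dict.empty, PySem.Dict.empty) pvRel_empty
  apply PySem.List.foldl_congr_mem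
  intro acc p _
  cases hp : (p.2 == "+") <;>
    simp only [hp, Bool.false_eq_true, if_false, if_true, (hrel p.1).1, (hrel p.1).2]
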